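-- pv_equiv track=rewrite | github.com/paulross/PyCppContainers | src/py/code_gen_documentation.py | comment_list_str
-- ===== SOURCE A (Python) =====
-- import typing
--
-- def comment_str(s: str) -> str:
--     """Turn a single line string into an inline comment."""
--     if '\n' in s:
--         raise ValueError(f'Inline comment can not have newlines in it.')
--     return '//{}'.format(s)
--
-- def comment_list_str(inputs: typing.List[str]) -> typing.List[str]:
--     """Returns the strings as a C++ comments."""
--     ret = []
--     for s in inputs:
--         if '\n' in s:
--             ret.extend([comment_str(v) for v in s.split('\n')])
--         else:
--             ret.append(comment_str(s))
--     return ret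
-- ===== SOURCE B (Python) =====
-- def comment_list_str(inputs):
--     """Returns the strings as C++ comments: join everything, split once on
--     newlines, prefix each resulting line with '//'."""
--     if not inputs:
--         return []
--     return ['//' + line for line in '\n'.join(inputs).split('\n')]
-- ===== Notes on version B (the rewrite author's own statement) =====
-- stated objective: alternative
-- what changed: B replaces A's per-element branch (newline test, per-string split, comment_str helper) with one join of all inputs on '\n', a single split of that string, and one map prefixing '//', guarded by an empty-list check.
import Mathlib
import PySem

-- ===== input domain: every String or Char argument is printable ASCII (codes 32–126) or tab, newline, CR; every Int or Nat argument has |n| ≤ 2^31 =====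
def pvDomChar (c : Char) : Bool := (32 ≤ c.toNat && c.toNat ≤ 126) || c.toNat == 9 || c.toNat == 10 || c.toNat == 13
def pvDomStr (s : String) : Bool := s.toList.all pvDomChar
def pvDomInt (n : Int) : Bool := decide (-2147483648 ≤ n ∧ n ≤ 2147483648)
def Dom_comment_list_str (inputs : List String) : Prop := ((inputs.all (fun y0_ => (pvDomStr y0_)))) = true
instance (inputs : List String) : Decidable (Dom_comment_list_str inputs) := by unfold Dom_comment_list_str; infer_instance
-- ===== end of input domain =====

-- B flattens with one '\n'.join + one split + one map instead of A's per-element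
-- newline branch; same cost, different decomposition (objective: alternative).


-- ===== PORT A =====
-- comment_str: '//{}'.format(s); its ValueError branch ('\n' in s) is unreachable at
-- comment_list_str's call sites (pieces of split('\n') contain no '\n'; the else branch
-- is guarded by the same test), so the port returns the formatted string directly.
def pvCommentStr (v : List Char) : String := String.ofList ('/' :: '/' :: v)

def comment_list_str (inputs : List String) : List String :=
  inputs.foldl (fun ret s =>
    if PySem.Str.isIn "\n" s then
      ret ++ (PySem.Chars.splitOn s.toList ['\n']).map pvCommentStr
    else
      ret ++ [pvCommentStr s.toList]) []

-- ===== PORT B =====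
def comment_list_str_alt (inputs : List String) : List String :=
  if inputs.isEmpty then []
  else
    (PySem.Chars.splitOn (PySem.Str.join "\n" inputs).toList ['\n']).map
      (fun line => String.ofList ('/' :: '/' :: line))

-- ===== PRECONDITION & SPEC =====
def Spec_comment_list_str (inputs : List String) (out : List String) : Prop := out = comment_list_str_alt inputs
instance (inputs : List String) (out : List String) : Decidable (Spec_comment_list_str inputs out) := by unfold Spec_comment_list_str; infer_instance

-- ===== CLAIM (what is proved, stated in full; the proofs are below) =====
def Claim_equal_comment_list_str : Prop := ∀ (inputs : List String), Dom_comment_list_str inputs → Spec_comment_list_str inputs (comment_list_str inputs)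

-- ===== LEMMAS AND PROOFS =====

/-- Simple recursive model of splitting on the single character '\n'. -/
def pvSp : List Char → List (List Char)
  | [] => [[]]
  | c :: r => if c = '\n' then [] :: pvSp r else (pvSp r).modifyHead (c :: ·)

theorem pvSp_ne_nil (l : List Char) : pvSp l ≠ [] := by
  cases l with
  | nil => simp [pvSp]
  | cons c r =>
    simp only [pvSp]
    split_ifs
    · simp
    · intro h
      have := pvSp_ne_nil r
      cases hr : pvSp r with
      | nil => exact this hr
      | cons a b => rw [hr] at h; simp [List.modifyHead] at h

theorem pvSplitOn_go_eq (fuel : Nat) (l cur : List Char) (acc : List (List Char))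
    (h : l.length ≤ fuel) :
    PySem.Chars.splitOn.go ['\n'] fuel l cur acc
      = acc.reverse ++ (pvSp l).modifyHead (cur.reverse ++ ·) := by
  induction fuel generalizing l cur acc with
  | zero =>
    have : l = [] := List.eq_nil_of_length_eq_zero (Nat.le_zero.mp h)
    subst this
    simp [PySem.Chars.splitOn.go, pvSp]
  | succ n ih =>
    cases l with
    | nil => simp [PySem.Chars.splitOn.go, pvSp]
    | cons c rest =>
      simp only [PySem.Chars.splitOn.go]
      by_cases hc : c = '\n'
      · subst hc
        rw [if_pos (by simp [List.isPrefixOf])]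
        simp only [List.length_singleton, List.drop_one, List.tail_cons]
        rw [ih rest [] (List.reverse cur :: acc) (by simpa using Nat.le_of_succ_le_succ h)]
        have : List.modifyHead (fun x : List Char => x) (pvSp rest) = pvSp rest := by
          cases hr : pvSp rest <;> simp [List.modifyHead]
        simp [pvSp, this]
      · rw [if_neg (by simp [List.isPrefixOf]; exact fun h' => hc h'.symm)]
        rw [ih rest (c :: cur) acc (by simpa using Nat.le_of_succ_le_succ h)]
        simp only [pvSp, if_neg hc]
        cases hr : pvSp rest with
        | nil => exact absurd hr (pvSp_ne_nil rest)
        | cons x y => simp [List.modifyHead]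

theorem pvSplitOn_eq_sp (s : List Char) :
    PySem.Chars.splitOn s ['\n'] = pvSp s := by
  unfold PySem.Chars.splitOn
  rw [pvSplitOn_go_eq _ _ _ _ (by omega)]
  cases h : pvSp s with
  | nil => exact absurd h (pvSp_ne_nil s)
  | cons a b => simp

theorem pvSp_no_newline (s : List Char) (h : '\n' ∉ s) : pvSp s = [s] := by
  induction s with
  | nil => rfl
  | cons c r ih =>
    simp only [List.mem_cons, not_or] at h
    have hc : ¬ c = '\n' := fun h' => h.1 h'.symm
    simp [pvSp, hc, ih h.2, List.modifyHead]

theorem pvSp_append (a b : List Char) :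
    pvSp (a ++ '\n' :: b) = pvSp a ++ pvSp b := by
  induction a with
  | nil => simp [pvSp]
  | cons c r ih =>
    by_cases hc : c = '\n'
    · subst hc; simp [pvSp, ih]
    · simp only [List.cons_append, pvSp, if_neg hc, ih]
      cases h : pvSp r with
      | nil => exact absurd h (pvSp_ne_nil r)
      | cons x y => simp [List.modifyHead]

theorem pvSp_intercalate (l : List (List Char)) (h : l ≠ []) :
    pvSp (List.intercalate ['\n'] l) = l.flatMap pvSp := by
  induction l with
  | nil => exact absurd rfl h
  | cons x rest ih =>
    cases rest with
    | nil => simp [List.intercalate]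
    | cons y r =>
      have : List.intercalate ['\n'] (x :: y :: r) = x ++ '\n' :: List.intercalate ['\n'] (y :: r) := by
        simp [List.intercalate, List.intersperse]
      rw [this, pvSp_append, ih (by simp)]
      simp

theorem pvBranch_eq (s : String) :
    (if PySem.Str.isIn "\n" s then
        (PySem.Chars.splitOn s.toList ['\n']).map pvCommentStr
      else [pvCommentStr s.toList])
      = (pvSp s.toList).map pvCommentStr := by
  by_cases h : PySem.Str.isIn "\n" s
  · rw [if_pos h, pvSplitOn_eq_sp]
  · rw [if_neg h]
    have hnot : '\n' ∉ s.toList := fun hm =>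
      h ((PySem.Str.isIn_iff_infix _ _).mpr (by
        simpa using (List.singleton_infix_iff '\n' s.toList).mpr hm))
    rw [pvSp_no_newline s.toList hnot]
    rfl

-- ===== VERDICT (by name: the statement is the Claim_ definition above) =====
theorem comment_list_str_spec : Claim_equal_comment_list_str := by
  intro inputs _
  unfold Spec_comment_list_str comment_list_str comment_list_str_alt
  have hfun :
      (fun (ret : List String) (s : String) =>
          if PySem.Str.isIn "\n" s then
            ret ++ (PySem.Chars.splitOn s.toList ['\n']).map pvCommentStr
          else ret ++ [pvCommentStr s.toList])
        = fun ret s => ret ++ (pvSp s.toList).map pvCommentStr := by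
    funext ret s
    rw [← pvBranch_eq s]
    split_ifs <;> rfl
  rw [hfun, PySem.List.foldl_append_eq_flatMap]
  cases inputs with
  | nil => rfl
  | cons x rest =>
    rw [if_neg (by simp)]
    rw [PySem.Str.toList_join]
    show _ = (PySem.Chars.splitOn (List.intercalate ['\n'] ((x :: rest).map String.toList)) ['\n']).map _
    rw [pvSplitOn_eq_sp, pvSp_intercalate _ (by simp), List.map_flatMap, List.flatMap_map]
    rfl
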